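-- pv_equiv track=rewrite | github.com/k-harada/AtCoder | other_contests/tokiomarine2020/C.py | solve
-- ===== SOURCE A (Python) =====
-- def solve(n, k, a_list):
--
--     for t in range(k):
--
--         left_list = [0] * n
--         right_list = [0] * n
--
--         for i in range(n):
--             left = i - a_list[i] - 1
--             if left >= 0:
--                 left_list[left] += 1
--             right = i + a_list[i] + 1
--             if right < n:
--                 right_list[right] += 1
--
--         a_list = [n] * n
--
--         if sum(left_list) == 0 and sum(right_list) == 0:
--             break
--
--         # right
--         right_erase = 0
--         for i in range(n):
--             right_erase += right_list[i]
--             a_list[i] -= right_erase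
--         # left
--         left_erase = 0
--         for i in range(n - 1, -1, -1):
--             left_erase += left_list[i]
--             a_list[i] -= left_erase
--
--     return " ".join([str(a) for a in a_list])
-- ===== SOURCE B (Python) =====
-- def solve(n, k, a_list):
--     for _ in range(k):
--         diff = [0] * (n + 1)
--         for i in range(n):
--             x = a_list[i]
--             l = i - x
--             r = i + x + 1
--             diff[l if l > 0 else 0] += 1
--             diff[r if r < n else n] -= 1
--         cover = []
--         run = 0
--         for d in diff[:n]:
--             run += d
--             cover.append(run)
--         a_list = cover
--         if all(c == n for c in cover):
--             break
--     return " ".join(str(a) for a in a_list)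
-- ===== Notes on version B (the rewrite author's own statement) =====
-- stated objective: simpler
-- what changed: Each iteration replaces A's two separate miss-count arrays (left_list/right_list), two sum() break tests and two directional erase passes subtracting from [n]*n by one signed difference array updated with clamped interval endpoints and a single forward prefix-sum pass that directly yields the coverage counts.
-- outside the precondition, e.g. on solve(3, 2, [-2, 3, -1]): A returns '2 2 2', B returns '2 3 2'; on solve(3, 1, [1, 0, -9]): A raises IndexError, B raises IndexError
import Mathlib
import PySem

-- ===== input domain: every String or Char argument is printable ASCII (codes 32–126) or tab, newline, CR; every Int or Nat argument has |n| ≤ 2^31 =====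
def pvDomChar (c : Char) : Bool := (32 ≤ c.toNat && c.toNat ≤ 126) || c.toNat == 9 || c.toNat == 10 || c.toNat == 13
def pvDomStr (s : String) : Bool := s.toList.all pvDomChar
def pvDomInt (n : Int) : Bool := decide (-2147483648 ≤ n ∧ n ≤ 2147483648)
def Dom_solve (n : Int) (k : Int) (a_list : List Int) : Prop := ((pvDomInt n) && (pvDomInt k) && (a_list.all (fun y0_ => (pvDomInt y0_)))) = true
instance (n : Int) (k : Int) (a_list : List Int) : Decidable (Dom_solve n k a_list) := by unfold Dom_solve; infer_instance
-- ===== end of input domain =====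

-- B replaces A's two scatter arrays and two directional erase passes by one signed
-- difference array and a single forward prefix-sum pass (objective: simpler).

-- `lst[idx] += d`, exact for 0 ≤ idx < len(lst); Python raises IndexError or wraps a
-- negative index otherwise — those inputs are outside Pre_solve.
def pyBump (v : List Int) (i : Int) (d : Int) : List Int :=
  if 0 ≤ i ∧ i.toNat < v.length then v.set i.toNat (v.getD i.toNat 0 + d) else v

-- ===== PORT A =====
-- the inner `for i in range(n)` loop building left_list (fst) and right_list (snd)
def solveStepLists (n : Nat) (a : List Int) : List Int × List Int :=
  (List.range n).foldl (fun p (i : Nat) =>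
      (if 0 ≤ (i : Int) - a.getD i 0 - 1 then pyBump p.1 ((i : Int) - a.getD i 0 - 1) 1 else p.1,
       if (i : Int) + a.getD i 0 + 1 < (n : Int) then pyBump p.2 ((i : Int) + a.getD i 0 + 1) 1 else p.2))
    (List.replicate n 0, List.replicate n 0)

-- `right_erase = 0; for i in range(n): right_erase += right_list[i]; a_list[i] -= right_erase`
def solveRightPass (n : Nat) (rl : List Int) (a : List Int) : List Int :=
  ((List.range n).foldl (fun (s : List Int × Int) (i : Nat) =>
      (pyBump s.1 i (-(s.2 + rl.getD i 0)), s.2 + rl.getD i 0)) (a, 0)).1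

-- `left_erase = 0; for i in range(n-1, -1, -1): left_erase += left_list[i]; a_list[i] -= left_erase`
def solveLeftPass (n : Nat) (ll : List Int) (a : List Int) : List Int :=
  (((List.range n).reverse).foldl (fun (s : List Int × Int) (i : Nat) =>
      (pyBump s.1 i (-(s.2 + ll.getD i 0)), s.2 + ll.getD i 0)) (a, 0)).1

-- one iteration of A's outer loop: the new a_list, and whether `break` fires
def solveStepA (n : Nat) (a : List Int) : List Int × Bool :=
  let p := solveStepLists n a
  let a1 := List.replicate n ((n : Nat) : Int)
  if p.1.sum = 0 ∧ p.2.sum = 0 then (a1, true)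
  else (solveLeftPass n p.1 (solveRightPass n p.2 a1), false)

def solveLoopA (n : Nat) : Nat → List Int → List Int
  | 0, a => a
  | t + 1, a =>
    let r := solveStepA n a
    if r.2 then r.1 else solveLoopA n t r.1

def solve (n : Int) (k : Int) (a_list : List Int) : String :=
  PySem.Str.join " " ((solveLoopA n.toNat k.toNat a_list).map PySem.Int.toStr)

-- ===== PORT B =====
-- one iteration of B's outer loop: diff scatter, then the prefix-sum pass building cover
def solveStepB (n : Nat) (a : List Int) : List Int :=
  let diff := (List.range n).foldl (fun d (i : Nat) =>
      pyBump (pyBump d (if 0 < (i : Int) - a.getD i 0 then (i : Int) - a.getD i 0 else 0) 1)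
        (if (i : Int) + a.getD i 0 + 1 < (n : Int) then (i : Int) + a.getD i 0 + 1 else (n : Int)) (-1))
    (List.replicate (n + 1) 0)
  ((diff.take n).foldl (fun (s : List Int × Int) d => (s.1 ++ [s.2 + d], s.2 + d)) ([], 0)).1

def solveLoopB (n : Nat) : Nat → List Int → List Int
  | 0, a => a
  | t + 1, a =>
    let c := solveStepB n a
    if c.all (fun v => v = ((n : Nat) : Int)) then c else solveLoopB n t c

def solve_alt (n : Int) (k : Int) (a_list : List Int) : String :=
  PySem.Str.join " " ((solveLoopB n.toNat k.toNat a_list).map PySem.Int.toStr)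

-- ===== PRECONDITION & SPEC =====
-- Pre_solve excludes (besides inputs with fewer than n entries, where both programs raise
-- IndexError) inputs whose first n entries contain a negative light range when k ≥ 1 and
-- n ≥ 1: ranges are nonnegative in this problem, A raises IndexError for most negative
-- values and otherwise returns a negative-index-wraparound artefact, and B likewise raises
-- or returns its own clamping artefact there — neither value is specified.
def Pre_solve (n : Int) (k : Int) (a_list : List Int) : Prop :=
  k ≤ 0 ∨ n ≤ 0 ∨ ((n : Int) ≤ a_list.length ∧ ∀ x ∈ a_list.take n.toNat, 0 ≤ x)
instance (n : Int) (k : Int) (a_list : List Int) : Decidable (Pre_solve n k a_list) := by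
  unfold Pre_solve; infer_instance

def pvWitness_solve : Int × Int × List Int := (3, 2, [1, 0, 2])

def Spec_solve (n : Int) (k : Int) (a_list : List Int) (out : String) : Prop := out = solve_alt n k a_list
instance (n : Int) (k : Int) (a_list : List Int) (out : String) : Decidable (Spec_solve n k a_list out) := by unfold Spec_solve; infer_instance

-- ===== CLAIM (what is proved, stated in full; the proofs are below) =====
def Claim_equal_solve : Prop := ∀ (n : Int) (k : Int) (a_list : List Int), Dom_solve n k a_list → Pre_solve n k a_list → Spec_solve n k a_list (solve n k a_list)

-- ===== LEMMAS AND PROOFS =====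

-- sum of the first m entries
def psum (v : List Int) (m : Nat) : Int := (v.take m).sum

-- invariant of both outer loops: the first n entries are nonnegative
def validA (n : Nat) (a : List Int) : Prop := ∀ j < n, 0 ≤ a.getD j 0

-- 0/1 indicator of light j NOT reaching cell i from the right / left, as A counts them
def termR (n : Nat) (a : List Int) (m : Nat) (j : Nat) : Int :=
  if ((j : Int) + a.getD j 0 + 1 < (n : Int)) ∧ ((j : Int) + a.getD j 0 + 1).toNat < m then 1 else 0
def termL (a : List Int) (m : Nat) (j : Nat) : Int :=
  if (0 ≤ (j : Int) - a.getD j 0 - 1) ∧ ((j : Int) - a.getD j 0 - 1).toNat < m then 1 else 0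
-- signed contribution of light j to B's prefix sum at cell m-1
def termB (n : Nat) (a : List Int) (m : Nat) (j : Nat) : Int :=
  (if (if 0 < (j : Int) - a.getD j 0 then (j : Int) - a.getD j 0 else 0).toNat < m then 1 else 0) +
  (if (if (j : Int) + a.getD j 0 + 1 < (n : Int) then (j : Int) + a.getD j 0 + 1 else (n : Int)).toNat < m
    then (-1 : Int) else 0)

theorem length_pyBump (v : List Int) (i d : Int) : (pyBump v i d).length = v.length := by
  unfold pyBump; split <;> simp

theorem psum_zero (v : List Int) : psum v 0 = 0 := rfl

theorem psum_succ (v : List Int) (m : Nat) : psum v (m + 1) = psum v m + v.getD m 0 := by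
  induction v generalizing m with
  | nil => simp [psum]
  | cons h tl ih =>
    cases m with
    | zero => simp [psum]
    | succ m' => simp only [psum, List.take_succ_cons, List.sum_cons, List.getD_cons_succ] at *
                 rw [ih]; ring

theorem psum_length (v : List Int) : psum v v.length = v.sum := by
  simp [psum]

theorem psum_replicate_zero (k m : Nat) : psum (List.replicate k (0 : Int)) m = 0 := by
  simp [psum, List.take_replicate]

theorem getD_pyBump (v : List Int) (i : Int) (d : Int) (j : Nat)
    (h0 : 0 ≤ i) (h1 : i.toNat < v.length) :
    (pyBump v i d).getD j 0 = if j = i.toNat then v.getD j 0 + d else v.getD j 0 := by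
  unfold pyBump
  rw [if_pos ⟨h0, h1⟩]
  by_cases hj : j = i.toNat
  · subst hj
    rw [if_pos rfl, List.getD_eq_getElem _ _ (by simpa using h1), List.getElem_set_self]
  · rw [if_neg hj]
    by_cases hjl : j < v.length
    · rw [List.getD_eq_getElem _ _ (by simpa using hjl), List.getD_eq_getElem _ _ hjl,
        List.getElem_set_ne (by omega)]
    · rw [List.getD_eq_default _ _ (by simpa using (by omega : ¬ j < v.length)),
        List.getD_eq_default _ _ (by omega)]

theorem psum_set (v : List Int) (t m : Nat) (x : Int) (ht : t < v.length) :
    psum (v.set t x) m = psum v m + (if t < m then x - v.getD t 0 else 0) := by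
  induction v generalizing t m with
  | nil => simp at ht
  | cons h tl ih =>
    cases t with
    | zero =>
      cases m with
      | zero => simp [psum]
      | succ m' => simp [psum]; ring
    | succ t' =>
      cases m with
      | zero => simp [psum]
      | succ m' =>
        simp only [List.set_cons_succ, psum, List.take_succ_cons, List.sum_cons,
          List.getD_cons_succ]
        have := ih t' m' (by simpa using ht)
        simp only [psum] at this
        rw [this]
        by_cases hc : t' < m'
        · rw [if_pos hc, if_pos (by omega)]
          ring
        · rw [if_neg hc, if_neg (by omega)]
          ring

theorem psum_pyBump (v : List Int) (i : Int) (d : Int) (m : Nat)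
    (h0 : 0 ≤ i) (h1 : i.toNat < v.length) :
    psum (pyBump v i d) m = psum v m + (if i.toNat < m then d else 0) := by
  unfold pyBump
  rw [if_pos ⟨h0, h1⟩, psum_set _ _ _ _ h1]
  split <;> ring

-- generic conditioned scatter: prefix sums of `if P j: w[f j] += δ` over a list of indices
theorem scatter_psum (P : Nat → Prop) [DecidablePred P] (f : Nat → Int) (δ : Int) :
    ∀ (L : List Nat) (v : List Int) (m : Nat),
    (∀ j ∈ L, P j → 0 ≤ f j ∧ (f j).toNat < v.length) →
    psum (L.foldl (fun w j => if P j then pyBump w (f j) δ else w) v) m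
      = psum v m + (L.map (fun j => if P j ∧ (f j).toNat < m then δ else 0)).sum := by
  intro L
  induction L with
  | nil => intro v m _; simp
  | cons j t ih =>
    intro v m h
    simp only [List.foldl_cons, List.map_cons, List.sum_cons]
    by_cases hP : P j
    · rw [if_pos hP,
        ih (pyBump v (f j) δ) m (by
          intro j' hj' hP'
          have := h j' (List.mem_cons_of_mem _ hj') hP'
          simpa [length_pyBump] using this),
        psum_pyBump v (f j) δ m (h j List.mem_cons_self hP).1 (h j List.mem_cons_self hP).2]
      by_cases hlt : (f j).toNat < m
      · rw [if_pos hlt, if_pos ⟨hP, hlt⟩]; ring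
      · rw [if_neg hlt, if_neg (by tauto)]; ring
    · rw [if_neg hP, ih v m (fun j' hj' hP' => h j' (List.mem_cons_of_mem _ hj') hP'),
        if_neg (by tauto)]
      ring

theorem scatter_length (P : Nat → Prop) [DecidablePred P] (f : Nat → Int) (δ : Int) :
    ∀ (L : List Nat) (v : List Int),
    (L.foldl (fun w j => if P j then pyBump w (f j) δ else w) v).length = v.length := by
  intro L
  induction L with
  | nil => intro v; rfl
  | cons j t ih =>
    intro v
    simp only [List.foldl_cons]
    by_cases hP : P j
    · rw [if_pos hP, ih, length_pyBump]
    · rw [if_neg hP, ih]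

-- B's double scatter: `w[f1 j] += 1; w[f2 j] -= 1`
theorem scatter2_psum (f1 f2 : Nat → Int) :
    ∀ (L : List Nat) (v : List Int) (m : Nat),
    (∀ j ∈ L, (0 ≤ f1 j ∧ (f1 j).toNat < v.length) ∧ (0 ≤ f2 j ∧ (f2 j).toNat < v.length)) →
    psum (L.foldl (fun w j => pyBump (pyBump w (f1 j) 1) (f2 j) (-1)) v) m
      = psum v m + (L.map (fun j =>
          (if (f1 j).toNat < m then (1 : Int) else 0) +
          (if (f2 j).toNat < m then (-1 : Int) else 0))).sum := by
  intro L
  induction L with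
  | nil => intro v m _; simp
  | cons j t ih =>
    intro v m h
    simp only [List.foldl_cons, List.map_cons, List.sum_cons]
    have h1 := (h j List.mem_cons_self).1
    have h2 := (h j List.mem_cons_self).2
    rw [ih _ m (by
        intro j' hj'
        have := h j' (List.mem_cons_of_mem _ hj')
        simpa [length_pyBump] using this),
      psum_pyBump _ _ _ _ h2.1 (by rw [length_pyBump]; exact h2.2),
      psum_pyBump _ _ _ _ h1.1 h1.2]
    ring

theorem scatter2_length (f1 f2 : Nat → Int) :
    ∀ (L : List Nat) (v : List Int),
    (L.foldl (fun w j => pyBump (pyBump w (f1 j) 1) (f2 j) (-1)) v).length = v.length := by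
  intro L
  induction L with
  | nil => intro v; rfl
  | cons j t ih => intro v; simp only [List.foldl_cons]; rw [ih, length_pyBump, length_pyBump]

-- the forward erase pass of A, fully characterised
theorem rightPass_fold (rl a : List Int) (m : Nat) (hm : m ≤ a.length) :
    ((List.range m).foldl (fun (s : List Int × Int) (i : Nat) =>
        (pyBump s.1 i (-(s.2 + rl.getD i 0)), s.2 + rl.getD i 0)) (a, 0)).2 = psum rl m ∧
    ((List.range m).foldl (fun (s : List Int × Int) (i : Nat) =>
        (pyBump s.1 i (-(s.2 + rl.getD i 0)), s.2 + rl.getD i 0)) (a, 0)).1.length = a.length ∧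
    ∀ j : Nat, ((List.range m).foldl (fun (s : List Int × Int) (i : Nat) =>
        (pyBump s.1 i (-(s.2 + rl.getD i 0)), s.2 + rl.getD i 0)) (a, 0)).1.getD j 0
      = if j < m then a.getD j 0 - psum rl (j + 1) else a.getD j 0 := by
  induction m with
  | zero => simp [psum_zero]
  | succ m' ih =>
    obtain ⟨ih2, ihl, ih1⟩ := ih (by omega)
    rw [List.range_succ, List.foldl_append, List.foldl_cons, List.foldl_nil]
    refine ⟨?_, ?_, ?_⟩
    · simp only [ih2]
      rw [psum_succ]
    · simp only [length_pyBump, ihl]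
    · intro j
      simp only []
      rw [getD_pyBump _ _ _ _ (by positivity) (by rw [Int.toNat_natCast, ihl]; omega),
        ih2, ih1 j]
      simp only [Int.toNat_natCast]
      by_cases hj : j = m'
      · subst hj
        rw [if_pos rfl, if_neg (lt_irrefl _), if_pos (by omega), psum_succ]
        ring
      · rw [if_neg hj]
        by_cases hlt : j < m'
        · rw [if_pos hlt, if_pos (by omega)]
        · rw [if_neg hlt, if_neg (by omega)]

-- the backward erase pass of A, fully characterised
theorem leftPass_fold (ll : List Int) (m : Nat) :
    ∀ (w : List Int) (e : Int), m ≤ w.length →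
    ((List.range m).reverse.foldl (fun (s : List Int × Int) (i : Nat) =>
        (pyBump s.1 i (-(s.2 + ll.getD i 0)), s.2 + ll.getD i 0)) (w, e)).1.length = w.length ∧
    ∀ j : Nat, ((List.range m).reverse.foldl (fun (s : List Int × Int) (i : Nat) =>
        (pyBump s.1 i (-(s.2 + ll.getD i 0)), s.2 + ll.getD i 0)) (w, e)).1.getD j 0
      = if j < m then w.getD j 0 - (e + (psum ll m - psum ll j)) else w.getD j 0 := by
  induction m with
  | zero => intro w e _; simp
  | succ m' ih =>
    intro w e hm
    have hrev : (List.range (m' + 1)).reverse = m' :: (List.range m').reverse := by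
      rw [List.range_succ, List.reverse_append]; rfl
    rw [hrev, List.foldl_cons]
    simp only []
    obtain ⟨ihl, ih1⟩ := ih (pyBump w m' (-(e + ll.getD m' 0))) (e + ll.getD m' 0)
      (by rw [length_pyBump]; omega)
    refine ⟨by rw [ihl, length_pyBump], ?_⟩
    intro j
    rw [ih1 j, getD_pyBump _ _ _ _ (by positivity) (by rw [Int.toNat_natCast]; omega)]
    simp only [Int.toNat_natCast]
    by_cases hj : j < m'
    · rw [if_pos hj, if_neg (show ¬ j = m' from by omega), if_pos (by omega), psum_succ]
      ring
    · by_cases hje : j = m'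
      · subst hje
        rw [if_neg (lt_irrefl j), if_pos rfl, if_pos (by omega), psum_succ]
        ring
      · rw [if_neg hj, if_neg hje, if_neg (by omega)]

-- the prefix-sum pass of B, as an explicit scan
def prefList (r : Int) : List Int → List Int
  | [] => []
  | d :: t => (r + d) :: prefList (r + d) t

theorem prefix_fold (L : List Int) : ∀ (acc : List Int) (r : Int),
    L.foldl (fun (s : List Int × Int) (d : Int) => (s.1 ++ [s.2 + d], s.2 + d)) (acc, r)
      = (acc ++ prefList r L, r + L.sum) := by
  induction L with
  | nil => intro acc r; simp [prefList]
  | cons d t ih =>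
    intro acc r
    rw [List.foldl_cons, ih]
    simp [prefList]
    ring

theorem length_prefList (L : List Int) : ∀ r, (prefList r L).length = L.length := by
  induction L with
  | nil => intro r; rfl
  | cons d t ih => intro r; simp [prefList, ih]

theorem getD_prefList (L : List Int) : ∀ (r : Int) (i : Nat), i < L.length →
    (prefList r L).getD i 0 = r + (L.take (i + 1)).sum := by
  induction L with
  | nil => intro r i h; simp at h
  | cons d t ih =>
    intro r i h
    cases i with
    | zero => simp [prefList]
    | succ i' =>
      simp only [prefList, List.getD_cons_succ, List.take_succ_cons, List.sum_cons]
      rw [ih (r + d) i' (by simpa using h)]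
      ring

-- equality of integer lists from lengths and getD
theorem list_eq_of_getD (v w : List Int) (hl : v.length = w.length)
    (h : ∀ i, i < v.length → v.getD i 0 = w.getD i 0) : v = w := by
  apply List.ext_getElem hl
  intro i h1 h2
  have := h i h1
  rwa [List.getD_eq_getElem _ _ h1, List.getD_eq_getElem _ _ h2] at this

-- linear recombination of the four per-light sums
theorem sum_map_comb {α : Type} (l : List α) (f g h : α → Int) :
    (l.map (fun x => 1 - f x - (g x - h x))).sum
      = (l.length : Int) - (l.map f).sum - ((l.map g).sum - (l.map h).sum) := by
  induction l with
  | nil => simp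
  | cons x t ih => simp [ih]; ring

-- ll / rl of one iteration of A
theorem stepLists_eq (n : Nat) (a : List Int) :
    solveStepLists n a =
      ((List.range n).foldl (fun w (i : Nat) =>
          if 0 ≤ (i : Int) - a.getD i 0 - 1 then pyBump w ((i : Int) - a.getD i 0 - 1) 1 else w)
        (List.replicate n 0),
       (List.range n).foldl (fun w (i : Nat) =>
          if (i : Int) + a.getD i 0 + 1 < (n : Int) then pyBump w ((i : Int) + a.getD i 0 + 1) 1 else w)
        (List.replicate n 0)) := by
  unfold solveStepLists
  exact PySem.List.foldl_prod_mk
    (fun w (i : Nat) => if 0 ≤ (i : Int) - a.getD i 0 - 1 then pyBump w ((i : Int) - a.getD i 0 - 1) 1 else w)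
    (fun w (i : Nat) => if (i : Int) + a.getD i 0 + 1 < (n : Int) then pyBump w ((i : Int) + a.getD i 0 + 1) 1 else w)
    (List.range n) (List.replicate n 0) (List.replicate n 0)

theorem ll_length (n : Nat) (a : List Int) : (solveStepLists n a).1.length = n := by
  rw [stepLists_eq]
  simpa using scatter_length (fun i : Nat => 0 ≤ (i : Int) - a.getD i 0 - 1)
    (fun i : Nat => (i : Int) - a.getD i 0 - 1) 1 (List.range n) (List.replicate n 0)

theorem rl_length (n : Nat) (a : List Int) : (solveStepLists n a).2.length = n := by
  rw [stepLists_eq]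
  simpa using scatter_length (fun i : Nat => (i : Int) + a.getD i 0 + 1 < (n : Int))
    (fun i : Nat => (i : Int) + a.getD i 0 + 1) 1 (List.range n) (List.replicate n 0)

theorem ll_psum (n : Nat) (a : List Int) (hval : validA n a) (m : Nat) :
    psum (solveStepLists n a).1 m = ((List.range n).map (termL a m)).sum := by
  rw [stepLists_eq]
  rw [scatter_psum (fun i : Nat => 0 ≤ (i : Int) - a.getD i 0 - 1)
      (fun i : Nat => (i : Int) - a.getD i 0 - 1) 1 (List.range n) (List.replicate n 0) m
      (by
        intro j hj hP
        have hjn : j < n := List.mem_range.mp hj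
        have hja := hval j hjn
        have hP' : 0 ≤ (j : Int) - a.getD j 0 - 1 := hP
        refine ⟨hP', ?_⟩
        show ((j : Int) - a.getD j 0 - 1).toNat < (List.replicate n (0 : Int)).length
        simp only [List.length_replicate]
        omega),
    psum_replicate_zero, zero_add]
  rfl

theorem rl_psum (n : Nat) (a : List Int) (hval : validA n a) (m : Nat) :
    psum (solveStepLists n a).2 m = ((List.range n).map (termR n a m)).sum := by
  rw [stepLists_eq]
  rw [scatter_psum (fun i : Nat => (i : Int) + a.getD i 0 + 1 < (n : Int))
      (fun i : Nat => (i : Int) + a.getD i 0 + 1) 1 (List.range n) (List.replicate n 0) m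
      (by
        intro j hj hP
        have hjn : j < n := List.mem_range.mp hj
        have hja := hval j hjn
        have hP' : (j : Int) + a.getD j 0 + 1 < (n : Int) := hP
        refine ⟨show (0 : Int) ≤ (j : Int) + a.getD j 0 + 1 from by omega, ?_⟩
        show ((j : Int) + a.getD j 0 + 1).toNat < (List.replicate n (0 : Int)).length
        simp only [List.length_replicate]
        omega),
    psum_replicate_zero, zero_add]
  rfl

-- the continuation (non-break) result of one iteration of A
theorem contA_getD (n : Nat) (rl ll : List Int) (i : Nat) (hi : i < n) :
    (solveLeftPass n ll (solveRightPass n rl (List.replicate n ((n : Nat) : Int)))).getD i 0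
      = (n : Int) - psum rl (i + 1) - (psum ll n - psum ll i) := by
  unfold solveRightPass solveLeftPass
  obtain ⟨h2, hl, h1⟩ := rightPass_fold rl (List.replicate n ((n : Nat) : Int)) n (by simp)
  obtain ⟨hl', h1'⟩ := leftPass_fold ll n _ 0 (by rw [hl]; simp)
  rw [h1', if_pos hi, h1 i, if_pos hi,
    List.getD_eq_getElem _ _ (by simpa using hi), List.getElem_replicate]
  ring

theorem contA_length (n : Nat) (rl ll : List Int) :
    (solveLeftPass n ll (solveRightPass n rl (List.replicate n ((n : Nat) : Int)))).length = n := by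
  unfold solveRightPass solveLeftPass
  obtain ⟨h2, hl, h1⟩ := rightPass_fold rl (List.replicate n ((n : Nat) : Int)) n (by simp)
  obtain ⟨hl', h1'⟩ := leftPass_fold ll n _ 0 (by rw [hl]; simp)
  rw [hl', hl]
  simp

-- B's one iteration, characterised
theorem stepB_eq_pref (n : Nat) (a : List Int) :
    solveStepB n a = prefList 0 (((List.range n).foldl (fun d (i : Nat) =>
      pyBump (pyBump d (if 0 < (i : Int) - a.getD i 0 then (i : Int) - a.getD i 0 else 0) 1)
        (if (i : Int) + a.getD i 0 + 1 < (n : Int) then (i : Int) + a.getD i 0 + 1 else (n : Int)) (-1))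
      (List.replicate (n + 1) 0)).take n) := by
  show ((((List.range n).foldl (fun d (i : Nat) =>
      pyBump (pyBump d (if 0 < (i : Int) - a.getD i 0 then (i : Int) - a.getD i 0 else 0) 1)
        (if (i : Int) + a.getD i 0 + 1 < (n : Int) then (i : Int) + a.getD i 0 + 1 else (n : Int)) (-1))
      (List.replicate (n + 1) 0)).take n).foldl
        (fun (s : List Int × Int) d => (s.1 ++ [s.2 + d], s.2 + d)) ([], 0)).1 = _
  rw [prefix_fold]
  simp

theorem diff_length (n : Nat) (a : List Int) :
    ((List.range n).foldl (fun d (i : Nat) =>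
      pyBump (pyBump d (if 0 < (i : Int) - a.getD i 0 then (i : Int) - a.getD i 0 else 0) 1)
        (if (i : Int) + a.getD i 0 + 1 < (n : Int) then (i : Int) + a.getD i 0 + 1 else (n : Int)) (-1))
      (List.replicate (n + 1) 0)).length = n + 1 := by
  simpa using scatter2_length
    (fun i : Nat => if 0 < (i : Int) - a.getD i 0 then (i : Int) - a.getD i 0 else 0)
    (fun i : Nat => if (i : Int) + a.getD i 0 + 1 < (n : Int) then (i : Int) + a.getD i 0 + 1 else (n : Int))
    (List.range n) (List.replicate (n + 1) 0)

theorem stepB_length (n : Nat) (a : List Int) : (solveStepB n a).length = n := by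
  rw [stepB_eq_pref, length_prefList, List.length_take, diff_length]
  omega

theorem stepB_getD (n : Nat) (a : List Int) (hval : validA n a) (i : Nat) (hi : i < n) :
    (solveStepB n a).getD i 0 = ((List.range n).map (termB n a (i + 1))).sum := by
  rw [stepB_eq_pref]
  rw [getD_prefList _ _ _ (by rw [List.length_take, diff_length]; omega)]
  rw [List.take_take]
  have hmin : min (i + 1) n = i + 1 := by omega
  rw [hmin, zero_add]
  show psum ((List.range n).foldl (fun d (i : Nat) =>
      pyBump (pyBump d (if 0 < (i : Int) - a.getD i 0 then (i : Int) - a.getD i 0 else 0) 1)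
        (if (i : Int) + a.getD i 0 + 1 < (n : Int) then (i : Int) + a.getD i 0 + 1 else (n : Int)) (-1))
      (List.replicate (n + 1) 0)) (i + 1) = _
  rw [scatter2_psum
      (fun i : Nat => if 0 < (i : Int) - a.getD i 0 then (i : Int) - a.getD i 0 else 0)
      (fun i : Nat => if (i : Int) + a.getD i 0 + 1 < (n : Int) then (i : Int) + a.getD i 0 + 1 else (n : Int))
      (List.range n) (List.replicate (n + 1) 0) (i + 1)
      (by
        intro j hj
        have hjn : j < n := List.mem_range.mp hj
        have hja := hval j hjn
        refine ⟨⟨?_, ?_⟩, ⟨?_, ?_⟩⟩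
        · show (0 : Int) ≤ if 0 < (j : Int) - a.getD j 0 then (j : Int) - a.getD j 0 else 0
          split_ifs <;> omega
        · show (if 0 < (j : Int) - a.getD j 0 then (j : Int) - a.getD j 0 else 0).toNat <
            (List.replicate (n + 1) (0 : Int)).length
          simp only [List.length_replicate]
          split_ifs <;> omega
        · show (0 : Int) ≤
            if (j : Int) + a.getD j 0 + 1 < (n : Int) then (j : Int) + a.getD j 0 + 1 else (n : Int)
          split_ifs <;> omega
        · show (if (j : Int) + a.getD j 0 + 1 < (n : Int) then (j : Int) + a.getD j 0 + 1
              else (n : Int)).toNat < (List.replicate (n + 1) (0 : Int)).length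
          simp only [List.length_replicate]
          split_ifs <;> omega),
    psum_replicate_zero, zero_add]
  rfl

-- the per-light identity tying B's signed count to A's three erase counts
theorem key_term (n : Nat) (a : List Int) (i j : Nat) (hi : i < n) (hj : j < n)
    (hja : 0 ≤ a.getD j 0) :
    termB n a (i + 1) j = 1 - termR n a (i + 1) j - (termL a n j - termL a i j) := by
  unfold termB termR termL
  split_ifs <;> omega

theorem key_sum (n : Nat) (a : List Int) (hval : validA n a) (i : Nat) (hi : i < n) :
    ((List.range n).map (termB n a (i + 1))).sum
      = (n : Int) - ((List.range n).map (termR n a (i + 1))).sum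
          - (((List.range n).map (termL a n)).sum - ((List.range n).map (termL a i)).sum) := by
  have hcong : (List.range n).map (termB n a (i + 1))
      = (List.range n).map (fun j => 1 - termR n a (i + 1) j - (termL a n j - termL a i j)) := by
    apply List.map_congr_left
    intro j hj
    exact key_term n a i j hi (List.mem_range.mp hj) (hval j (List.mem_range.mp hj))
  rw [hcong, sum_map_comb]
  simp

-- B's iteration equals A's continuation
theorem stepB_eq_cont (n : Nat) (a : List Int) (hval : validA n a) :
    solveStepB n a = solveLeftPass n (solveStepLists n a).1
      (solveRightPass n (solveStepLists n a).2 (List.replicate n ((n : Nat) : Int))) := by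
  apply list_eq_of_getD
  · rw [stepB_length, contA_length]
  · intro i hi
    rw [stepB_length] at hi
    rw [stepB_getD n a hval i hi, contA_getD n _ _ i hi, key_sum n a hval i hi,
      rl_psum n a hval, ll_psum n a hval, ll_psum n a hval]

-- sums of the indicator maps are monotone in m and nonnegative
theorem termR_sum_nonneg (n : Nat) (a : List Int) (m : Nat) :
    0 ≤ ((List.range n).map (termR n a m)).sum := by
  apply List.sum_nonneg
  intro x hx
  obtain ⟨j, _, rfl⟩ := List.mem_map.mp hx
  unfold termR; split <;> omega

theorem termL_sum_nonneg (a : List Int) (n m : Nat) :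
    0 ≤ ((List.range n).map (termL a m)).sum := by
  apply List.sum_nonneg
  intro x hx
  obtain ⟨j, _, rfl⟩ := List.mem_map.mp hx
  unfold termL; split <;> omega

theorem termR_sum_mono (n : Nat) (a : List Int) (m m' : Nat) (h : m ≤ m') :
    ((List.range n).map (termR n a m)).sum ≤ ((List.range n).map (termR n a m')).sum := by
  apply List.sum_le_sum
  intro j _
  unfold termR; split_ifs <;> omega

theorem termL_sum_mono (a : List Int) (n m m' : Nat) (h : m ≤ m') :
    ((List.range n).map (termL a m)).sum ≤ ((List.range n).map (termL a m')).sum := by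
  apply List.sum_le_sum
  intro j _
  unfold termL; split_ifs <;> omega

theorem termL_sum_zero (a : List Int) (n : Nat) : ((List.range n).map (termL a 0)).sum = 0 := by
  have : (List.range n).map (termL a 0) = (List.range n).map (fun _ => (0 : Int)) := by
    apply List.map_congr_left
    intro j _
    unfold termL
    rw [if_neg (by omega)]
  simp [this]

-- the two break tests agree
theorem break_iff (n : Nat) (a : List Int) (hval : validA n a) :
    ((solveStepLists n a).1.sum = 0 ∧ (solveStepLists n a).2.sum = 0)
      ↔ ∀ i < n, (solveStepB n a).getD i 0 = ((n : Nat) : Int) := by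
  have hR : ∀ m, psum (solveStepLists n a).2 m = ((List.range n).map (termR n a m)).sum :=
    rl_psum n a hval
  have hL : ∀ m, psum (solveStepLists n a).1 m = ((List.range n).map (termL a m)).sum :=
    ll_psum n a hval
  have hRs : (solveStepLists n a).2.sum = ((List.range n).map (termR n a n)).sum := by
    rw [← psum_length, rl_length, hR]
  have hLs : (solveStepLists n a).1.sum = ((List.range n).map (termL a n)).sum := by
    rw [← psum_length, ll_length, hL]
  constructor
  · rintro ⟨hl0, hr0⟩ i hi
    rw [stepB_getD n a hval i hi, key_sum n a hval i hi]
    rw [hRs] at hr0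
    rw [hLs] at hl0
    have e1 : ((List.range n).map (termR n a (i + 1))).sum = 0 :=
      le_antisymm (hr0 ▸ termR_sum_mono n a (i + 1) n (by omega)) (termR_sum_nonneg n a (i + 1))
    have e2 : ((List.range n).map (termL a i)).sum = 0 :=
      le_antisymm (hl0 ▸ termL_sum_mono a n i n (by omega)) (termL_sum_nonneg a n i)
    rw [e1, e2, hl0]
    ring
  · intro hall
    rcases Nat.eq_zero_or_pos n with hn | hn
    · subst hn
      constructor
      · rw [List.eq_nil_of_length_eq_zero (ll_length 0 a)]; rfl
      · rw [List.eq_nil_of_length_eq_zero (rl_length 0 a)]; rfl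
    · have h1 := hall (n - 1) (by omega)
      have h2 := hall 0 hn
      rw [stepB_getD n a hval _ (by omega), key_sum n a hval _ (by omega)] at h1
      rw [stepB_getD n a hval _ hn, key_sum n a hval _ hn] at h2
      have hsub : n - 1 + 1 = n := by omega
      rw [hsub] at h1
      rw [termL_sum_zero] at h2
      simp only [Nat.zero_add] at h2
      have hRn := termR_sum_nonneg n a n
      have hR1 := termR_sum_nonneg n a 1
      have hR1m := termR_sum_mono n a 1 n (by omega)
      have hLn := termL_sum_nonneg a n n
      have hLm := termL_sum_mono a n (n - 1) n (by omega)
      have hLp := termL_sum_nonneg a n (n - 1)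
      constructor
      · rw [hLs]; omega
      · rw [hRs]; omega

-- both loops preserve the validity invariant
theorem stepB_valid (n : Nat) (a : List Int) (hval : validA n a) : validA n (solveStepB n a) := by
  intro i hi
  rw [stepB_getD n a hval i hi]
  apply List.sum_nonneg
  intro x hx
  obtain ⟨j, hj, rfl⟩ := List.mem_map.mp hx
  have hjn : j < n := List.mem_range.mp hj
  have hja := hval j hjn
  unfold termB
  split_ifs <;> omega

-- all-equal test of B ↔ entrywise getD
theorem all_iff_getD (n : Nat) (c : List Int) (hc : c.length = n) :
    (c.all (fun v => v = ((n : Nat) : Int)) = true) ↔ ∀ i < n, c.getD i 0 = ((n : Nat) : Int) := by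
  rw [List.all_eq_true]
  constructor
  · intro h i hi
    have hil : i < c.length := by omega
    have := h _ (List.getElem_mem hil)
    rw [List.getD_eq_getElem _ _ hil]
    simpa using this
  · intro h v hv
    obtain ⟨i, hi, rfl⟩ := List.mem_iff_getElem.mp hv
    have := h i (by omega)
    rw [List.getD_eq_getElem _ _ hi] at this
    simp [this]

theorem stepA_eq (n : Nat) (a : List Int) :
    solveStepA n a =
      if (solveStepLists n a).1.sum = 0 ∧ (solveStepLists n a).2.sum = 0
      then (List.replicate n ((n : Nat) : Int), true)
      else (solveLeftPass n (solveStepLists n a).1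
              (solveRightPass n (solveStepLists n a).2 (List.replicate n ((n : Nat) : Int))),
            false) := rfl

theorem loopA_succ (n t : Nat) (a : List Int) :
    solveLoopA n (t + 1) a =
      if (solveStepA n a).2 then (solveStepA n a).1 else solveLoopA n t (solveStepA n a).1 := rfl

theorem loopB_succ (n t : Nat) (a : List Int) :
    solveLoopB n (t + 1) a =
      if (solveStepB n a).all (fun v => v = ((n : Nat) : Int)) then solveStepB n a
      else solveLoopB n t (solveStepB n a) := rfl

theorem loop_eq (n : Nat) : ∀ (fuel : Nat) (a : List Int), validA n a →
    solveLoopA n fuel a = solveLoopB n fuel a := by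
  intro fuel
  induction fuel with
  | zero => intro a _; rfl
  | succ t ih =>
    intro a hval
    rw [loopA_succ, loopB_succ, stepA_eq]
    by_cases hbr : ((solveStepLists n a).1.sum = 0 ∧ (solveStepLists n a).2.sum = 0)
    · rw [if_pos hbr]
      have hgd := (break_iff n a hval).mp hbr
      have hcB : solveStepB n a = List.replicate n ((n : Nat) : Int) := by
        apply list_eq_of_getD
        · simp [stepB_length]
        · intro i hi
          rw [stepB_length] at hi
          rw [hgd i hi, List.getD_eq_getElem _ _ (by simpa using hi), List.getElem_replicate]
      have hall : (solveStepB n a).all (fun v => v = ((n : Nat) : Int)) = true :=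
        (all_iff_getD n _ (stepB_length n a)).mpr hgd
      rw [if_pos hall, hcB]
      simp
    · rw [if_neg hbr]
      have hnall : ¬ ((solveStepB n a).all (fun v => v = ((n : Nat) : Int)) = true) := by
        intro hall
        exact hbr ((break_iff n a hval).mpr ((all_iff_getD n _ (stepB_length n a)).mp hall))
      rw [if_neg hnall]
      simp only [Bool.false_eq_true, if_false]
      rw [← stepB_eq_cont n a hval]
      exact ih (solveStepB n a) (stepB_valid n a hval)

-- ===== VERDICT (by name: the statement is the Claim_ definition above) =====
theorem solve_spec : Claim_equal_solve := by
  intro n k a_list _ hpre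
  unfold Spec_solve solve solve_alt
  rcases hpre with hk | hn | ⟨hlen, hpos⟩
  · rw [Int.toNat_of_nonpos hk]
    rfl
  · rw [Int.toNat_of_nonpos hn]
    rw [loop_eq 0 k.toNat a_list (by intro j hj; omega)]
  · rw [loop_eq n.toNat k.toNat a_list ?_]
    intro j hj
    have hjl : j < a_list.length := by omega
    have hjt : j < (a_list.take n.toNat).length := by
      rw [List.length_take]; omega
    have hmem : (a_list.take n.toNat)[j]'hjt ∈ a_list.take n.toNat := List.getElem_mem hjt
    have heq : (a_list.take n.toNat)[j]'hjt = a_list[j]'hjl := List.getElem_take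
    have := hpos _ hmem
    rw [heq] at this
    rwa [List.getD_eq_getElem _ _ hjl]
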